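-- pv_equiv track=rewrite | github.com/jarfo/sort | word.py | reflected
-- ===== SOURCE A (Python) =====
-- def rot_and_rev(wordc, channels=None):
--     n = len(wordc) - 1
--     c = wordc[-1]
--     word = wordc[:-1]
--
--     wrd2 = word + word
--     rev2 = wrd2[::-1]
--     if channels is None:
--         wrd = min(wrd2[k:k+n] for k in range(0, n-1, 2))
--         rev = min(rev2[k:k+n] for k in range(0, n-1, 2))
--         return min(wrd, rev) + c
--     else:
--         chn2 = channels + channels
--         rch2 = chn2[::-1]
--         wrd = min((wrd2[k:k+n] + c, chn2[k:k+n]) for k in range(0, n-1, 2))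
--         rev = min((rev2[k:k+n] + c, rch2[k:k+n]) for k in range(0, n-1, 2))
--         return min(wrd, rev)
--
-- def reflected(sentence):
--     s = []
--     for word in sentence:
--         word = word.translate(str.maketrans('12','21'))
--         if word[-1] == 'c':
--             # cycle
--             word = rot_and_rev(word)
--         elif word[0] != '0' or word[-1] == '0':
--             # stick or tail
--             word = min(word, word[::-1])
--         s.append(word)
--     return sorted(s)
-- ===== SOURCE B (Python) =====
-- def _swap12(word):
--     return ''.join('2' if ch == '1' else '1' if ch == '2' else ch for ch in word)
--
-- def _min_even_rot(w):
--     # smallest among the rotations of w by offsets 0, 2, 4, ... (< len(w)-1),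
--     # computed by rotating in place by two and keeping a running minimum
--     best = w
--     cur = w
--     for _ in range(len(w) // 2 - 1):
--         cur = cur[2:] + cur[:2]
--         if cur < best:
--             best = cur
--     return best
--
-- def _canon(word):
--     word = _swap12(word)
--     if word[-1] == 'c':
--         body = word[:-1]
--         return min(_min_even_rot(body), _min_even_rot(body[::-1])) + 'c'
--     if word[0] != '0' or word[-1] == '0':
--         return min(word, word[::-1])
--     return word
--
-- def reflected(sentence):
--     return sorted(_canon(word) for word in sentence)
-- ===== Notes on version B (the rewrite author's own statement) =====
-- stated objective: alternative
-- what changed: Per word, B replaces A's doubled-string construction (word+word, its reverse, and min over all n-length slices at even starts via a generic rot_and_rev helper with a dead channels branch) by a direct scan that rotates the word in place by two characters and keeps a running minimum, deriving the reversed-side candidates from the reversed word itself; the sentence loop becomes a comprehension over a per-word canonicalizer.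
import Mathlib
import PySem

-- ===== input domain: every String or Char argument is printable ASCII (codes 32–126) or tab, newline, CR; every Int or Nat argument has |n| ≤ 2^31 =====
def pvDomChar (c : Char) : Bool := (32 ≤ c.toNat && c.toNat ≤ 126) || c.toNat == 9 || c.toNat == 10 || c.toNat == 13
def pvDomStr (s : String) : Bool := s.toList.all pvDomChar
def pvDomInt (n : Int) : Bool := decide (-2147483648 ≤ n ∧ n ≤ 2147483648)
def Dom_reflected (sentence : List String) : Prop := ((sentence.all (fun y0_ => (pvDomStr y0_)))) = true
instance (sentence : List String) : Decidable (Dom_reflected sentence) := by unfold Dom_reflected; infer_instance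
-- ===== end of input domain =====

-- B replaces A's doubled-string slicing by an in-place rotate-by-two scan with a running
-- minimum (alternative decomposition, same asymptotic cost).


-- ===== PORT A =====
def pvSwapA (ch : Char) : Char := if ch = '1' then '2' else if ch = '2' then '1' else ch

-- port of rot_and_rev with channels=None (the only way A calls it; the channels branch is
-- dead code in A and returns a value of a different type, so it is not ported)
def rotAndRev (wordc : List Char) : List Char :=
  let n : Int := (wordc.length : Int) - 1
  match PySem.List.pyGet? wordc (-1) with
  | none => []      -- Python IndexError (wordc empty); excluded by Pre_
  | some c =>
    let word := PySem.List.slice wordc none (some (-1))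
    let wrd2 := word ++ word
    let rev2 := (PySem.List.slice? wrd2 none none (-1)).getD []
    let wrd? := PySem.List.min?
      ((PySem.List.pyRange 0 (n-1) 2).map
        (fun k => PySem.List.slice wrd2 (some k) (some (k+n)))) (fun x => x)
    let rev? := PySem.List.min?
      ((PySem.List.pyRange 0 (n-1) 2).map
        (fun k => PySem.List.slice rev2 (some k) (some (k+n)))) (fun x => x)
    match wrd?, rev? with
    | some wrd, some rev => (if rev < wrd then rev else wrd) ++ [c]
    | _, _ => []  -- Python ValueError (min of an empty generator); excluded by Pre_

def reflected (sentence : List String) : List String :=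
  let s := sentence.foldl (fun s word =>
    let w := word.toList.map pvSwapA
    let w :=
      if PySem.List.pyGet? w (-1) = some 'c' then rotAndRev w
      else if PySem.List.pyGet? w 0 ≠ some '0' ∨ PySem.List.pyGet? w (-1) = some '0' then
        (let r := (PySem.List.slice? w none none (-1)).getD []
         if r < w then r else w)
      else w
    s ++ [String.ofList w]) []
  PySem.List.sorted s (fun x => x) false

-- ===== PORT B =====
def pvSwapB (ch : Char) : Char :=
  match ch with
  | '1' => '2'
  | '2' => '1'
  | _ => ch

def minEvenRot (w : List Char) : List Char :=
  ((List.range (w.length / 2 - 1)).foldl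
    (fun p _ =>
      let cur := p.2.drop 2 ++ p.2.take 2
      (if cur < p.1 then cur else p.1, cur))
    (w, w)).1

def pvCanon (word : String) : String :=
  let w := word.toList.map pvSwapB
  if w.getLast? = some 'c' then
    let body := w.dropLast
    String.ofList (min (minEvenRot body) (minEvenRot body.reverse) ++ ['c'])
  else if w.head? ≠ some '0' ∨ w.getLast? = some '0' then
    String.ofList (min w w.reverse)
  else
    String.ofList w

def reflected_alt (sentence : List String) : List String :=
  PySem.List.sorted (sentence.map pvCanon) (fun x => x) false

-- ===== PRECONDITION & SPEC =====
-- Pre_ excludes exactly the inputs where A raises: an empty word (IndexError at word[-1]) or a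
-- word ending in 'c' of length < 3 (ValueError: min() of an empty generator in rot_and_rev).
def Pre_reflected (sentence : List String) : Prop :=
  ∀ w ∈ sentence, w.toList ≠ [] ∧ (w.toList.getLast? = some 'c' → 3 ≤ w.toList.length)
instance (sentence : List String) : Decidable (Pre_reflected sentence) := by
  unfold Pre_reflected; infer_instance
def pvWitness_reflected : List String := ["12c0", "abc", "0ab", "0ab0", "x"]

def Spec_reflected (sentence : List String) (out : List String) : Prop := out = reflected_alt sentence
instance (sentence : List String) (out : List String) : Decidable (Spec_reflected sentence out) := by unfold Spec_reflected; infer_instance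

-- ===== CLAIM (what is proved, stated in full; the proofs are below) =====
def Claim_equal_reflected : Prop := ∀ (sentence : List String), Dom_reflected sentence → Pre_reflected sentence → Spec_reflected sentence (reflected sentence)

-- ===== LEMMAS AND PROOFS =====

def pvRot2 (y : List Char) : List Char := y.drop 2 ++ y.take 2

lemma pv_min_if (a b : List Char) : (if b < a then b else a) = min a b := by
  rw [min_def]; split_ifs with h1 h2 h2
  · exact absurd h1 (not_lt.mpr h2)
  · rfl
  · rfl
  · exact absurd (lt_of_not_ge h2) h1

lemma pv_rot_iter (x : List Char) : ∀ (i : Nat), 2*i ≤ x.length →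
    pvRot2^[i] x = x.drop (2*i) ++ x.take (2*i) := by
  intro i
  induction i with
  | zero => simp
  | succ i ih =>
    intro h
    rw [Function.iterate_succ_apply', ih (by omega), pvRot2]
    have hlen : 2 ≤ (x.drop (2*i)).length := by simp; omega
    rw [List.drop_append_of_le_length hlen, List.take_append_of_le_length hlen,
        List.drop_drop, List.append_assoc]
    have : 2*(i+1) = 2*i + 2 := by ring
    rw [this, List.take_add]

lemma pv_pairfold (m : Nat) (b x : List Char) :
    (List.range m).foldl (fun p (_ : Nat) =>
        let cur := p.2.drop 2 ++ p.2.take 2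
        (if cur < p.1 then cur else p.1, cur)) (b, x)
    = (((List.range m).map (fun i => pvRot2^[i+1] x)).foldl min b, pvRot2^[m] x) := by
  induction m with
  | zero => simp
  | succ m ih =>
    rw [List.range_succ, List.foldl_append, List.map_append, List.foldl_append, ih]
    simp only [List.foldl_cons, List.foldl_nil, List.map_cons, List.map_nil]
    rw [Function.iterate_succ_apply']
    exact congrArg (fun z => (z, _)) (pv_min_if _ _) |>.trans rfl





lemma pv_minEven_spec (x : List Char) (hN : 2 ≤ x.length) :
    PySem.List.min?
      ((PySem.List.pyRange 0 ((x.length:Int)-1) 2).map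
        (fun k => PySem.List.slice (x ++ x) (some k) (some (k+(x.length:Int))))) (fun y => y)
    = some (minEvenRot x) := by
  set N := x.length with hNdef
  have hcnt : (if (0:Int) < (N:Int)-1 then (((N:Int)-1 - 0 + 2 - 1)/2).toNat else 0) = N/2 := by
    rw [if_pos (by omega)]; omega
  rw [PySem.List.pyRange_of_pos 0 ((N:Int)-1) (by omega), hcnt, List.map_map]
  have hcands : ((List.range (N/2)).map
      ((fun k => PySem.List.slice (x ++ x) (some k) (some (k+(N:Int)))) ∘ (fun k : ℕ => 0 + 2 * (k:ℤ))))
      = (List.range (N/2)).map (fun i => pvRot2^[i] x) := by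
    apply List.map_congr_left
    intro i hi
    have hi' : i < N/2 := List.mem_range.mp hi
    have h2i : 2*i ≤ N := by omega
    simp only [Function.comp_apply]
    have e1 : (0 + 2 * ((i:Nat):Int)) = ((2*i : Nat) : Int) := by push_cast; ring
    have e2 : ((2*i : Nat):Int) + (N:Int) = ((2*i + N : Nat) : Int) := by push_cast; ring
    rw [e1, e2, PySem.List.slice_natCast]
    have e3 : 2*i + N - 2*i = N := by omega
    rw [e3, List.drop_append_of_le_length (by omega), List.take_append]
    have e4 : (x.drop (2*i)).take N = x.drop (2*i) := List.take_of_length_le (by simp; omega)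
    have e5 : N - (x.drop (2*i)).length = 2*i := by simp; omega
    rw [e4, e5, pv_rot_iter x i h2i]
  rw [hcands]
  obtain ⟨m, hm⟩ : ∃ m, N/2 = m + 1 := ⟨N/2 - 1, by omega⟩
  rw [hm, List.range_succ_eq_map, List.map_cons, List.map_map]
  have hcons : PySem.List.min? (pvRot2^[0] x :: List.map ((fun i => pvRot2^[i] x) ∘ Nat.succ) (List.range m)) (fun y => y)
      = some ((List.map ((fun i => pvRot2^[i] x) ∘ Nat.succ) (List.range m)).foldl min (pvRot2^[0] x)) := by
    convert PySem.List.min?_id_cons (pvRot2^[0] x) (List.map ((fun i => pvRot2^[i] x) ∘ Nat.succ) (List.range m)) using 2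
  rw [hcons]
  congr 1
  unfold minEvenRot
  rw [← hNdef, pv_pairfold]
  have hm' : N / 2 - 1 = m := by omega
  rw [hm']
  simp [Function.comp_def, Nat.succ_eq_add_one]

-- the per-word value A's loop appends (definitionally the body of reflected's foldl)
def pvWordA (word : String) : String :=
  let w := word.toList.map pvSwapA
  let w :=
    if PySem.List.pyGet? w (-1) = some 'c' then rotAndRev w
    else if PySem.List.pyGet? w 0 ≠ some '0' ∨ PySem.List.pyGet? w (-1) = some '0' then
      (let r := (PySem.List.slice? w none none (-1)).getD []
       if r < w then r else w)
    else w
  String.ofList w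

lemma pv_swapAB : pvSwapA = pvSwapB := by
  funext c
  by_cases h1 : c = '1'
  · subst h1; rfl
  · by_cases h2 : c = '2'
    · subst h2; rfl
    · simp [pvSwapA, pvSwapB, h1, h2]

lemma pv_pyGet_last (xs : List Char) : PySem.List.pyGet? xs (-1) = xs.getLast? := by
  simp only [PySem.List.pyGet?, PySem.List.pyIdx?]
  rcases xs.eq_nil_or_concat with rfl | ⟨ys, a, rfl⟩
  · simp
  · simp [List.getElem?_append]

lemma pv_pyGet_head (xs : List Char) : PySem.List.pyGet? xs 0 = xs.head? := by
  simp only [PySem.List.pyGet?, PySem.List.pyIdx?]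
  cases xs <;> simp

lemma pv_swapB_c (a : Char) : pvSwapB a = 'c' ↔ a = 'c' := by
  rw [← pv_swapAB, pvSwapA]
  by_cases h1 : a = '1'
  · subst h1; simp
  · by_cases h2 : a = '2'
    · subst h2; simp
    · simp [h1, h2]

lemma pv_rotAndRev_eq (w : List Char) (hc : w.getLast? = some 'c') (h3 : 3 ≤ w.length) :
    rotAndRev w = min (minEvenRot w.dropLast) (minEvenRot w.dropLast.reverse) ++ ['c'] := by
  unfold rotAndRev
  simp only [pv_pyGet_last, hc, PySem.List.slice_to_neg_one,
    PySem.List.slice?_none_none_neg_one, Option.getD_some, List.reverse_append]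
  have hn : (w.length : Int) - 1 = (w.dropLast.length : Int) := by simp; omega
  have hb2 : 2 ≤ w.dropLast.length := by simp; omega
  rw [hn, pv_minEven_spec w.dropLast hb2]
  have hnrev : (w.dropLast.length : Int) = (w.dropLast.reverse.length : Int) := by simp
  rw [hnrev, pv_minEven_spec w.dropLast.reverse (by simp; omega)]
  simp only
  rw [pv_min_if]

lemma pv_word_eq (word : String)
    (_h1 : word.toList ≠ [])
    (h2 : word.toList.getLast? = some 'c' → 3 ≤ word.toList.length) :
    pvWordA word = pvCanon word := by
  unfold pvWordA pvCanon
  rw [pv_swapAB]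
  simp only [pv_pyGet_last, pv_pyGet_head]
  set w := word.toList.map pvSwapB with hw
  by_cases hc : w.getLast? = some 'c'
  · have hlast : word.toList.getLast? = some 'c' := by
      rw [hw, List.getLast?_map] at hc
      obtain ⟨a, ha, hsw⟩ := Option.map_eq_some_iff.mp hc
      rw [ha, (pv_swapB_c a).mp hsw]
    have hlen3 : 3 ≤ w.length := by
      have := h2 hlast
      simp only [hw, List.length_map]
      omega
    rw [if_pos hc, if_pos hc, pv_rotAndRev_eq w hc hlen3]
  · rw [if_neg hc, if_neg hc]
    by_cases hs : w.head? ≠ some '0' ∨ w.getLast? = some '0'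
    · rw [if_pos hs, if_pos hs]
      simp only [PySem.List.slice?_none_none_neg_one, Option.getD_some]
      rw [pv_min_if]
    · rw [if_neg hs, if_neg hs]

-- ===== VERDICT (by name: the statement is the Claim_ definition above) =====
theorem reflected_spec : Claim_equal_reflected := by
  intro sentence _ hpre
  unfold Spec_reflected
  show PySem.List.sorted (sentence.foldl (fun s word => s ++ [pvWordA word]) []) (fun x => x) false
      = reflected_alt sentence
  rw [PySem.List.foldl_append_singleton_eq_map pvWordA sentence []]
  unfold reflected_alt
  rw [List.nil_append]
  congr 1
  apply List.map_congr_left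
  intro word hwmem
  exact pv_word_eq word (hpre word hwmem).1 (hpre word hwmem).2
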